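-- pv_equiv track=rewrite | github.com/ishandutta2007/codeforces | avinashkartik/normal/1059/C.py | rec
-- ===== SOURCE A (Python) =====
-- def rec(n,ct):
-- 	if(n == 1):
-- 		return [ct]
-- 	elif(n == 2):
-- 		return [ct,2*ct]
-- 	elif(n == 3):
-- 		return [ct,ct,3*ct]
-- 	else:
-- 		cnt = 0
-- 		for j in range(1,n+1):
-- 			if(j%2 == 1): cnt += 1
-- 		ans = [ct]*cnt
-- 		ans += rec(n//2,ct*2)
-- 		return ans
-- ===== SOURCE B (Python) =====
-- def rec(n, ct):
--     # Iterative rewrite: the odd-counting inner loop is replaced by the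
--     # closed form (n + 1) // 2 and the halving recursion by a while loop.
--     ans = []
--     while n >= 4:
--         ans += [ct] * ((n + 1) // 2)
--         ct *= 2
--         n //= 2
--     if n == 1:
--         ans.append(ct)
--     elif n == 2:
--         ans += [ct, 2 * ct]
--     elif n == 3:
--         ans += [ct, ct, 3 * ct]
--     return ans
-- ===== Notes on version B (the rewrite author's own statement) =====
-- stated objective: faster
-- what changed: Replaced the halving recursion with an iterative while-loop and replaced the linear odd-counting inner loop by the closed form (n+1)//2, so each level costs O(1) arithmetic plus output construction instead of an O(n) scan.
import Mathlib
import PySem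

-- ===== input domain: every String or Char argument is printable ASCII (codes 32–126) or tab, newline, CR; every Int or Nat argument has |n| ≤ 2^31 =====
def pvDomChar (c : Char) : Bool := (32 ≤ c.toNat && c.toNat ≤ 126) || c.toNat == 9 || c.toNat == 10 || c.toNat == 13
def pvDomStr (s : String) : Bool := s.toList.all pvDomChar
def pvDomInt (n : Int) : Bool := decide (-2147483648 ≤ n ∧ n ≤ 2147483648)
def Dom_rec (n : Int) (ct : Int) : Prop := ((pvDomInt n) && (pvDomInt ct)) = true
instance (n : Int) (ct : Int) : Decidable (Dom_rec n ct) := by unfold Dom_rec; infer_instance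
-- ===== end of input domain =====

-- B replaces A's halving recursion and linear odd-count scan by an iterative
-- loop with the closed form (n+1)//2; equal on n ≥ 1, where A terminates.

-- ===== PORT A =====
-- literal transliteration of A; the recursion is run on fuel n.toNat + 1,
-- which is enough for every n ≥ 1 (proved below); fuel exhaustion returns []
-- only on inputs outside Pre_rec, where the Python recurses forever.
def recFuelA (fuel : Nat) (n : Int) (ct : Int) : List Int :=
  match fuel with
  | 0 => []
  | fuel + 1 =>
    if n = 1 then [ct]
    else if n = 2 then [ct, 2 * ct]
    else if n = 3 then [ct, ct, 3 * ct]
    else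
      let cnt : Int := (PySem.List.pyRange 1 (n + 1) 1).foldl
        (fun cnt j => if PySem.Int.mod j 2 = 1 then cnt + 1 else cnt) 0
      let ans := PySem.List.pyRepeat [ct] cnt
      ans ++ recFuelA fuel (PySem.Int.floordiv n 2) (ct * 2)

def rec (n : Int) (ct : Int) : List Int := recFuelA (n.toNat + 1) n ct

-- ===== PORT B =====
-- the while-loop of Source B, carrying (n, ct, ans) as its state
def recLoopB (n : Int) (ct : Int) (ans : List Int) : Int × Int × List Int :=
  if h : 4 ≤ n then
    recLoopB (PySem.Int.floordiv n 2) (ct * 2)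
      (ans ++ PySem.List.pyRepeat [ct] (PySem.Int.floordiv (n + 1) 2))
  else (n, ct, ans)
termination_by n.toNat
decreasing_by
  have h2 : PySem.Int.floordiv n 2 = n / 2 := PySem.Int.floordiv_eq_ediv_of_pos (by omega)
  rw [h2]; omega

def rec_alt (n : Int) (ct : Int) : List Int :=
  match recLoopB n ct [] with
  | (n, ct, ans) =>
    if n = 1 then ans ++ [ct]
    else if n = 2 then ans ++ [ct, 2 * ct]
    else if n = 3 then ans ++ [ct, ct, 3 * ct]
    else ans

-- ===== PRECONDITION & SPEC =====
-- Pre_: for n ≤ 0 the Python A recurses forever (RecursionError); excluded.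
def Pre_rec (n : Int) (ct : Int) : Prop := 1 ≤ n
instance (n : Int) (ct : Int) : Decidable (Pre_rec n ct) := by unfold Pre_rec; infer_instance
def pvWitness_rec : Int × Int := (5, 1)

def Spec_rec (n : Int) (ct : Int) (out : List Int) : Prop := out = rec_alt n ct
instance (n : Int) (ct : Int) (out : List Int) : Decidable (Spec_rec n ct out) := by unfold Spec_rec; infer_instance

-- ===== CLAIM (what is proved, stated in full; the proofs are below) =====
def Claim_equal_rec : Prop := ∀ (n : Int) (ct : Int), Dom_rec n ct → Pre_rec n ct → Spec_rec n ct (rec n ct)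

-- ===== LEMMAS AND PROOFS =====

-- A's odd-counting loop over range(1, n+1) computes the closed form (n+1)//2.
lemma cntA_closed : ∀ (m : Nat),
    (PySem.List.pyRange 1 ((m : Int) + 1) 1).foldl
      (fun cnt j => if PySem.Int.mod j 2 = 1 then cnt + 1 else cnt) (0 : Int)
      = PySem.Int.floordiv ((m : Int) + 1) 2 := by
  intro m
  induction m with
  | zero => decide
  | succ k ih =>
    have hsplit : PySem.List.pyRange 1 ((k : Int) + 1 + 1) 1
        = PySem.List.pyRange 1 ((k : Int) + 1) 1 ++ [(k : Int) + 1] :=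
      PySem.List.pyRange_one_succ_right (by omega)
    have hfd1 : PySem.Int.floordiv ((k : Int) + 1) 2 = ((k : Int) + 1) / 2 :=
      PySem.Int.floordiv_eq_ediv_of_pos (by omega)
    have hfd2 : PySem.Int.floordiv ((k : Int) + 1 + 1) 2 = ((k : Int) + 1 + 1) / 2 :=
      PySem.Int.floordiv_eq_ediv_of_pos (by omega)
    have hmod : PySem.Int.mod ((k : Int) + 1) 2 = ((k : Int) + 1) % 2 :=
      PySem.Int.mod_eq_emod_of_pos (by omega)
    push_cast
    push_cast at ih hsplit
    rw [hsplit, List.foldl_append, ih, List.foldl_cons, List.foldl_nil, hmod,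
      hfd1, hfd2]
    split_ifs with hodd <;> omega

-- the fuel n.toNat+1 is sufficient: loop-then-tail equals the fuelled recursion
lemma loopB_eq_recFuelA : ∀ (fuel : Nat) (n ct : Int) (ans : List Int),
    1 ≤ n → n.toNat ≤ fuel →
    (match recLoopB n ct ans with
     | (n, ct, ans) =>
       if n = 1 then ans ++ [ct]
       else if n = 2 then ans ++ [ct, 2 * ct]
       else if n = 3 then ans ++ [ct, ct, 3 * ct]
       else ans)
      = ans ++ recFuelA fuel n ct := by
  intro fuel
  induction fuel with
  | zero => intro n ct ans h1 h2; exact absurd h2 (by omega)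
  | succ f ih =>
    intro n ct ans h1 h2
    by_cases h4 : 4 ≤ n
    · have hfd : PySem.Int.floordiv n 2 = n / 2 :=
        PySem.Int.floordiv_eq_ediv_of_pos (by omega)
      rw [recLoopB]
      rw [dif_pos h4]
      have hn' : 1 ≤ PySem.Int.floordiv n 2 := by rw [hfd]; omega
      have hle : (PySem.Int.floordiv n 2).toNat ≤ f := by rw [hfd]; omega
      rw [ih _ _ _ hn' hle]
      have hcnt :
          (PySem.List.pyRange 1 (n + 1) 1).foldl
            (fun cnt j => if PySem.Int.mod j 2 = 1 then cnt + 1 else cnt) (0 : Int)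
            = PySem.Int.floordiv (n + 1) 2 := by
        have := cntA_closed n.toNat
        have hn : ((n.toNat : Int)) = n := by omega
        rwa [hn] at this
      rw [recFuelA]
      rw [if_neg (by omega), if_neg (by omega), if_neg (by omega)]
      simp only [hcnt, List.append_assoc]
    · rw [recLoopB, dif_neg h4, recFuelA]
      rcases (by omega : n = 1 ∨ n = 2 ∨ n = 3) with h | h | h <;> subst h <;> simp

theorem rec_eq (n ct : Int) (h : 1 ≤ n) : rec n ct = rec_alt n ct := by
  unfold rec rec_alt
  rw [loopB_eq_recFuelA (n.toNat + 1) n ct [] h (by omega), List.nil_append]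

-- ===== VERDICT (by name: the statement is the Claim_ definition above) =====
theorem rec_spec : Claim_equal_rec := by
  intro n ct _ hpre
  unfold Spec_rec
  exact rec_eq n ct hpre
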